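-- pv_equiv track=rewrite | github.com/racai-ai/mwe_baseline | scripts/mwe_csv2cupt_JA.py | split_cupt_sentences
-- ===== SOURCE A (Python) =====
-- def split_cupt_sentences(lines):
--     sents = []
--     cur = []
--     for ln in lines:
--         if ln.strip() == "":
--             if cur:
--                 sents.append(cur)
--                 cur = []
--         else:
--             cur.append(ln)
--     if cur:
--         sents.append(cur)
--     return sents
-- ===== SOURCE B (Python) =====
-- from itertools import groupby
--
-- def split_cupt_sentences(lines):
--     return [list(g) for k, g in groupby(lines, key=lambda ln: ln.strip() == "") if not k]
-- ===== Notes on version B (the rewrite author's own statement) =====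
-- stated objective: idiomatic
-- what changed: Replaced the manual flush-on-blank accumulator loop with itertools.groupby partitioning the lines into maximal blank/non-blank runs and keeping the non-blank runs.
import Mathlib
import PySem

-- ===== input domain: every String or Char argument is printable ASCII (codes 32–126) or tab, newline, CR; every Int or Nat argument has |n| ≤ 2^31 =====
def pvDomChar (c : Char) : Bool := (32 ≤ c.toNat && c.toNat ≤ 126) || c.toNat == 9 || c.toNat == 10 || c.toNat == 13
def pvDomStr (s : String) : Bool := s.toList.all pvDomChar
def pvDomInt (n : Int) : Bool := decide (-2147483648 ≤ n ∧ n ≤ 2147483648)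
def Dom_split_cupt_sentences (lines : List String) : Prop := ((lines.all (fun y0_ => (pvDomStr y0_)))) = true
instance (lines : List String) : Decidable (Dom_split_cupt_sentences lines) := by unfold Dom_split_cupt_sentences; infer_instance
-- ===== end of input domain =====

-- B replaces A's manual flush-on-blank accumulator with a groupby into blank/non-blank runs (idiomatic; return value only, no mutation involved).

-- ===== PORT A =====
-- one step of A's for-loop over state (sents, cur)
def pvAStep (st : List (List String) × List String) (ln : String) : List (List String) × List String :=
  if PySem.Str.strip ln == "" then
    (if st.2 ≠ [] then (st.1 ++ [st.2], []) else st)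
  else (st.1, st.2 ++ [ln])

def split_cupt_sentences (lines : List String) : List (List String) :=
  let st := lines.foldl pvAStep ([], [])
  if st.2 ≠ [] then st.1 ++ [st.2] else st.1

-- ===== PORT B =====
-- itertools.groupby with key = blankness: maximal runs of lines sharing the key
def pvBlank (ln : String) : Bool := PySem.Str.strip ln == ""

def pvGroupRuns : List String → List (Bool × List String)
  | [] => []
  | l :: ls =>
    match pvGroupRuns ls with
    | (k, g) :: rest => if pvBlank l == k then (k, l :: g) :: rest else (pvBlank l, [l]) :: (k, g) :: rest
    | [] => [(pvBlank l, [l])]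

def split_cupt_sentences_alt (lines : List String) : List (List String) :=
  (pvGroupRuns lines).filterMap (fun kg => if kg.1 then none else some kg.2)

-- ===== PRECONDITION & SPEC =====
def Spec_split_cupt_sentences (lines : List String) (out : List (List String)) : Prop := out = split_cupt_sentences_alt lines
instance (lines : List String) (out : List (List String)) : Decidable (Spec_split_cupt_sentences lines out) := by unfold Spec_split_cupt_sentences; infer_instance

-- ===== CLAIM (what is proved, stated in full; the proofs are below) =====
def Claim_equal_split_cupt_sentences : Prop := ∀ (lines : List String), Dom_split_cupt_sentences lines → Spec_split_cupt_sentences lines (split_cupt_sentences lines)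

-- ===== LEMMAS AND PROOFS =====

-- pending-run view of B: B's result with a pending non-empty run `cur` still open in front
def pvPend (cur : List String) (ls : List String) : List (List String) :=
  if cur = [] then split_cupt_sentences_alt ls
  else
    match pvGroupRuns ls with
    | (false, h) :: rest => (cur ++ h) :: (rest.filterMap (fun kg => if kg.1 then none else some kg.2))
    | _ => cur :: split_cupt_sentences_alt ls

theorem pvAlt_cons_blank (l : String) (ls : List String) (hb : pvBlank l = true) :
    split_cupt_sentences_alt (l :: ls) = split_cupt_sentences_alt ls := by
  simp only [split_cupt_sentences_alt, pvGroupRuns]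
  cases hg : pvGroupRuns ls with
  | nil => simp [hb]
  | cons kg rest =>
    obtain ⟨k, g⟩ := kg
    cases k <;> simp [hb]

theorem pvPend_blank (l : String) (ls : List String) (cur : List String) (hb : pvBlank l = true)
    (hc : cur ≠ []) : pvPend cur (l :: ls) = cur :: split_cupt_sentences_alt ls := by
  simp only [pvPend, if_neg hc, pvGroupRuns]
  cases hg : pvGroupRuns ls with
  | nil => simp [hb, pvAlt_cons_blank l ls hb, split_cupt_sentences_alt, pvGroupRuns, hg]
  | cons kg rest =>
    obtain ⟨k, g⟩ := kg
    cases k <;>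
      simp [hb, split_cupt_sentences_alt, pvGroupRuns, hg]

theorem pvPend_nonblank (l : String) (ls : List String) (cur : List String) (hb : pvBlank l = false) :
    pvPend cur (l :: ls) = pvPend (cur ++ [l]) ls := by
  have hne : cur ++ [l] ≠ [] := by simp
  simp only [pvPend, if_neg hne]
  cases hg : pvGroupRuns ls with
  | nil =>
    by_cases hc : cur = [] <;>
      simp [hc, split_cupt_sentences_alt, pvGroupRuns, hg, hb]
  | cons kg rest =>
    obtain ⟨k, g⟩ := kg
    cases k <;> by_cases hc : cur = [] <;>
      simp [hc, split_cupt_sentences_alt, pvGroupRuns, hg, hb]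

theorem pvFoldl_pend (ls : List String) : ∀ (sents : List (List String)) (cur : List String),
    (let st := ls.foldl pvAStep (sents, cur); if st.2 ≠ [] then st.1 ++ [st.2] else st.1)
      = sents ++ pvPend cur ls := by
  induction ls with
  | nil =>
    intro sents cur
    simp only [List.foldl_nil, pvPend, pvGroupRuns, split_cupt_sentences_alt, List.filterMap_nil]
    by_cases h : cur = [] <;> simp [h]
  | cons l ls ih =>
    intro sents cur
    rw [List.foldl_cons]
    by_cases hb : pvBlank l
    · have hb' : (PySem.Str.strip l == "") = true := hb
      by_cases hc : cur = []
      · subst hc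
        have hstep : pvAStep (sents, ([] : List String)) l = (sents, []) := by
          simp [pvAStep, hb']
        rw [hstep, ih sents []]
        congr 1
        simp [pvPend]
        exact (pvAlt_cons_blank l ls hb).symm
      · have hstep : pvAStep (sents, cur) l = (sents ++ [cur], []) := by
          simp [pvAStep, hb', hc]
        rw [hstep, ih (sents ++ [cur]) [], pvPend_blank l ls cur hb hc]
        simp [pvPend]
    · have hb' : (PySem.Str.strip l == "") = false := by simpa [pvBlank] using hb
      have hstep : pvAStep (sents, cur) l = (sents, cur ++ [l]) := by
        simp [pvAStep, hb']
      rw [hstep, ih sents (cur ++ [l]), pvPend_nonblank l ls cur (by simpa [pvBlank] using hb)]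

-- ===== VERDICT (by name: the statement is the Claim_ definition above) =====
theorem split_cupt_sentences_spec : Claim_equal_split_cupt_sentences := by
  intro lines _
  show split_cupt_sentences lines = split_cupt_sentences_alt lines
  have h := pvFoldl_pend lines [] []
  simpa [split_cupt_sentences, pvPend] using h
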